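-- pv_equiv track=rewrite | github.com/alexfiftysix/AdventOfCode2017 | Day3.py | move_around_spiral
-- ===== SOURCE A (Python) =====
-- def move(start_pos, direction):
--     """
--     Move one place in the given direction
--     L: left
--     R: right
--     U: up
--     D: down
--     :param start_pos: Tuple(int, int): Starting position
--     :param direction: direction to move in [L, R, U, D]
--     """
--     x, y = start_pos
--
--     if direction == 'R':
--         x += 1
--     elif direction == 'L':
--         x -= 1
--     elif direction == 'U':
--         y += 1
--     elif direction == 'D':
--         y -= 1
--     end_pos = (x, y)
--     return end_pos
--
-- def move_around_spiral(start_pos, ring_no):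
--     width = ring_no * 2 - 1
--     current_pos = start_pos
--
--     # move right 1
--     current_pos = move(current_pos, "R")
--
--     # Move up width-2
--     for x in range(width - 2):
--         current_pos = move(current_pos, 'U')
--
--     # Move left width-1
--     for x in range(width - 1):
--         current_pos = move(current_pos, 'L')
--
--     # Move down width-1
--     for x in range(width - 1):
--         current_pos = move(current_pos, 'D')
--
--     # Move right width-1
--     for x in range(width - 1):
--         current_pos = move(current_pos, 'R')
--
--     return current_pos
-- ===== SOURCE B (Python) =====
-- def move_around_spiral(start_pos, ring_no):
--     # Closed form: the walk's net displacement is (+1, -1) for any real ring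
--     # (ring_no >= 2); for ring_no <= 1 every loop body is empty and only the
--     # initial step right happens, so the displacement is (+1, 0).
--     x, y = start_pos
--     if ring_no >= 2:
--         return (x + 1, y - 1)
--     return (x + 1, y)
-- ===== Notes on version B (the rewrite author's own statement) =====
-- stated objective: faster
-- what changed: Replaced the O(ring_no) step-by-step walk around the ring with an O(1) closed form: the net displacement is (+1,-1) for ring_no >= 2 and (+1,0) otherwise (empty loops).
import Mathlib
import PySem

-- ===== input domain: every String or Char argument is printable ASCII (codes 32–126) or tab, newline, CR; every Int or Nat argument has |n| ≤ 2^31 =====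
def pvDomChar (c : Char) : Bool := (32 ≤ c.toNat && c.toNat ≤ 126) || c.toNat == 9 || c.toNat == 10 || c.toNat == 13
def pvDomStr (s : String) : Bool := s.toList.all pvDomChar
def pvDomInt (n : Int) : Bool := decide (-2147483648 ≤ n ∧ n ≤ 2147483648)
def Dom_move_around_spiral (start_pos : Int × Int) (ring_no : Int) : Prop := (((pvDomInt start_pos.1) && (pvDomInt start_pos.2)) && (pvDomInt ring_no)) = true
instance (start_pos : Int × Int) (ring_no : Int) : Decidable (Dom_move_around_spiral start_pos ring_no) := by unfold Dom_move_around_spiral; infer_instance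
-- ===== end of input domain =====

-- B replaces A's O(ring_no) step-by-step walk by an O(1) closed form for the net displacement.

-- ===== PORT A =====
-- helper 'move', branch order as in Python
def pvMove (start_pos : Int × Int) (direction : String) : Int × Int :=
  let x := start_pos.1
  let y := start_pos.2
  if direction = "R" then (x + 1, y)
  else if direction = "L" then (x - 1, y)
  else if direction = "U" then (x, y + 1)
  else if direction = "D" then (x, y - 1)
  else (x, y)

def move_around_spiral (start_pos : Int × Int) (ring_no : Int) : Int × Int :=
  let width := ring_no * 2 - 1
  let current_pos := start_pos
  -- move right 1
  let current_pos := pvMove current_pos "R"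
  -- Move up width-2
  let current_pos := (PySem.List.pyRange 0 (width - 2) 1).foldl (fun c _ => pvMove c "U") current_pos
  -- Move left width-1
  let current_pos := (PySem.List.pyRange 0 (width - 1) 1).foldl (fun c _ => pvMove c "L") current_pos
  -- Move down width-1
  let current_pos := (PySem.List.pyRange 0 (width - 1) 1).foldl (fun c _ => pvMove c "D") current_pos
  -- Move right width-1
  let current_pos := (PySem.List.pyRange 0 (width - 1) 1).foldl (fun c _ => pvMove c "R") current_pos
  current_pos

-- ===== PORT B =====
def move_around_spiral_alt (start_pos : Int × Int) (ring_no : Int) : Int × Int :=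
  if ring_no ≥ 2 then (start_pos.1 + 1, start_pos.2 - 1)
  else (start_pos.1 + 1, start_pos.2)

-- ===== PRECONDITION & SPEC =====
def Spec_move_around_spiral (start_pos : Int × Int) (ring_no : Int) (out : Int × Int) : Prop := out = move_around_spiral_alt start_pos ring_no
instance (start_pos : Int × Int) (ring_no : Int) (out : Int × Int) : Decidable (Spec_move_around_spiral start_pos ring_no out) := by unfold Spec_move_around_spiral; infer_instance

-- ===== CLAIM (what is proved, stated in full; the proofs are below) =====
def Claim_equal_move_around_spiral : Prop := ∀ (start_pos : Int × Int) (ring_no : Int), Dom_move_around_spiral start_pos ring_no → Spec_move_around_spiral start_pos ring_no (move_around_spiral start_pos ring_no)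

-- ===== LEMMAS AND PROOFS =====

theorem foldl_pvMove_U (l : List Int) (p : Int × Int) :
    l.foldl (fun c _ => pvMove c "U") p = (p.1, p.2 + l.length) := by
  induction l generalizing p with
  | nil => simp
  | cons h t ih => rw [List.foldl_cons, ih]; simp [pvMove]; omega

theorem foldl_pvMove_L (l : List Int) (p : Int × Int) :
    l.foldl (fun c _ => pvMove c "L") p = (p.1 - l.length, p.2) := by
  induction l generalizing p with
  | nil => simp
  | cons h t ih => rw [List.foldl_cons, ih]; simp [pvMove]; omega

theorem foldl_pvMove_D (l : List Int) (p : Int × Int) :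
    l.foldl (fun c _ => pvMove c "D") p = (p.1, p.2 - l.length) := by
  induction l generalizing p with
  | nil => simp
  | cons h t ih => rw [List.foldl_cons, ih]; simp [pvMove]; omega

theorem foldl_pvMove_R (l : List Int) (p : Int × Int) :
    l.foldl (fun c _ => pvMove c "R") p = (p.1 + l.length, p.2) := by
  induction l generalizing p with
  | nil => simp
  | cons h t ih => rw [List.foldl_cons, ih]; simp [pvMove]; omega

-- ===== VERDICT (by name: the statement is the Claim_ definition above) =====
theorem move_around_spiral_spec : Claim_equal_move_around_spiral := by
  intro ⟨x, y⟩ r _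
  show move_around_spiral (x, y) r = move_around_spiral_alt (x, y) r
  unfold move_around_spiral move_around_spiral_alt
  simp only [foldl_pvMove_U, foldl_pvMove_L, foldl_pvMove_D, foldl_pvMove_R]
  simp [pvMove, PySem.List.length_pyRange_one, Prod.ext_iff]
  split <;> constructor <;> omega
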